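-- pv_equiv track=rewrite | github.com/pypi-data/pypi-mirror-91 | packages/anage/anage-0.0.2.tar.gz/anage-0.0.2/anage.py | dependencies
-- ===== SOURCE A (Python) =====
-- from collections import defaultdict, deque
--
-- def dependencies(edges, packages):
--     """Return implicit dependencies of given packages."""
--     result, queue = set(), deque(packages)
--     while queue:
--         v = queue.popleft()
--         if v in result: continue
--         result.add(v)
--         queue.extend(edges[v])
--     return result
-- ===== SOURCE B (Python) =====
-- def dependencies(edges, packages):
--     """Return implicit dependencies of given packages."""
--     result = set()
--     frontier = set(packages)
--     while frontier:
--         result |= frontier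
--         frontier = {n for v in frontier for n in edges[v]} - result
--     return result
-- ===== Notes on version B (the rewrite author's own statement) =====
-- stated objective: alternative
-- what changed: Replaced the node-at-a-time deque BFS (pop one vertex, test membership, push its neighbours) by a level-synchronous set-fixpoint iteration: per round the whole frontier is unioned into the result and the next frontier is the set of all frontier neighbours minus the result, with no queue and no per-node visited test.
-- outside the precondition, e.g. on dependencies({'a': [], 'b': ['c']}, ['a']): A returns {'a'}, B returns {'a'}; on dependencies({'a': ['x']}, ['a']): A raises KeyError, B raises KeyError
import Mathlib
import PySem

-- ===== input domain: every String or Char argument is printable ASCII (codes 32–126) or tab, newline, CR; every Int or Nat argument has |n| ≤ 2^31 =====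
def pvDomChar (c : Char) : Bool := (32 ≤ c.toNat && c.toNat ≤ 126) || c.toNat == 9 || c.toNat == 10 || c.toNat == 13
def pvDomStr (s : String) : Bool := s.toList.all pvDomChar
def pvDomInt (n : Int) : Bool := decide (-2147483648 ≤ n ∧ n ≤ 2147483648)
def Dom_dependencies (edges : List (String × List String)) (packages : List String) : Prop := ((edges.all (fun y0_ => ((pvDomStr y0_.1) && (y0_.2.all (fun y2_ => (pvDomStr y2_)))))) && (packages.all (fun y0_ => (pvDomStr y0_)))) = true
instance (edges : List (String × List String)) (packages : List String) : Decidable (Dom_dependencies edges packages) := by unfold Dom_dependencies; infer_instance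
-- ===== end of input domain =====

-- B replaces A's node-at-a-time deque BFS by a level-synchronous set-fixpoint iteration
-- (whole-frontier union and subtraction per round); objective: alternative (same cost).

-- ===== PORT A =====
-- measure for A's loop: number of distinct dict keys not yet in `result`
def depKeysLeft (edges : List (String × List String)) (result : List String) : Nat :=
  ((PySem.List.dedup (edges.map Prod.fst)).filter (fun k => !(PySem.Set.contains result k))).length

-- termination helper: a pointwise-narrower filter that loses a member of the list is strictly shorter
theorem pvFilterLenMono (l : List String) (p q : String → Bool)
    (hmono : ∀ x ∈ l, p x = true → q x = true) : (l.filter p).length ≤ (l.filter q).length := by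
  induction l with
  | nil => simp
  | cons h t ih =>
    have ih' := ih (fun x hx => hmono x (List.mem_cons_of_mem _ hx))
    by_cases hp : p h = true
    · simp [List.filter_cons, hp, hmono h (List.mem_cons_self) hp]; omega
    · simp only [List.filter_cons, Bool.not_eq_true] at *
      simp [hp]
      rcases hq : q h <;> simp [hq] <;> omega

theorem pvFilterLenLt (l : List String) (p q : String → Bool) (v : String)
    (hv : v ∈ l) (hq : q v = true) (hp : p v = false)
    (hmono : ∀ x ∈ l, p x = true → q x = true) : (l.filter p).length < (l.filter q).length := by
  induction l with
  | nil => cases hv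
  | cons h t ih =>
    have hmono' : ∀ x ∈ t, p x = true → q x = true := fun x hx => hmono x (List.mem_cons_of_mem _ hx)
    rcases List.mem_cons.mp hv with rfl | hvt
    · have hle := pvFilterLenMono t p q hmono'
      simp [List.filter_cons, hp, hq]; omega
    · have := ih hvt hmono'
      by_cases hph : p h = true
      · simp [List.filter_cons, hph, hmono h (List.mem_cons_self) hph]; omega
      · simp only [Bool.not_eq_true] at hph
        simp [List.filter_cons, hph]
        rcases hqh : q h <;> simp <;> omega

theorem pvMemKeysOfGet (edges : List (String × List String)) (v : String) (nbrs : List String)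
    (h : (PySem.Dict.mk edges).get? v = some nbrs) : v ∈ edges.map Prod.fst := by
  simp only [PySem.Dict.get?, Option.map_eq_some_iff] at h
  obtain ⟨p, hp, rfl⟩ := h
  have hm := List.mem_of_find?_eq_some hp
  have he := List.find?_some hp
  simp at he
  subst he
  exact List.mem_map_of_mem hm

theorem pvKeysLeftLt (edges : List (String × List String)) (result result' : List String) (v : String)
    (hv : v ∈ edges.map Prod.fst) (hnr : v ∉ result)
    (hsub : ∀ k, k ∈ result → k ∈ result') (hv' : v ∈ result') :
    depKeysLeft edges result' < depKeysLeft edges result := by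
  unfold depKeysLeft
  apply pvFilterLenLt _ _ _ v
  · rw [PySem.List.mem_dedup]; exact hv
  · simp [PySem.Set.contains, List.contains_iff_mem, hnr]
  · simp [PySem.Set.contains, List.contains_iff_mem, hv']
  · intro x _ hx
    simp only [PySem.Set.contains, Bool.not_eq_eq_eq_not, Bool.not_true, Bool.not_eq_true] at *
    rcases hxr : (result.contains x) with _|_
    · rfl
    · exact absurd (hsub x (List.contains_iff_mem.mp hxr)) (by simpa [List.contains_iff_mem] using hx)

-- A: deque BFS.  (Python adds v to result before 'edges[v]' can raise KeyError; since a raise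
-- discards the return value, the port checks the lookup in the same step — return values agree.)
def bfsA (edges : List (String × List String)) (result : List String) (queue : List String) : Option (List String) :=
  match queue with
  | [] => some result
  | v :: rest =>
    if hin : PySem.Set.contains result v then bfsA edges result rest
    else
      match hg : (PySem.Dict.mk edges).get? v with
      | none => none   -- KeyError: edges[v]
      | some nbrs => bfsA edges (PySem.Set.add result v) (rest ++ nbrs)
termination_by (depKeysLeft edges result, queue.length)
decreasing_by
  · exact Prod.Lex.right _ (by simp)
  · apply Prod.Lex.left
    apply pvKeysLeftLt edges result _ v (pvMemKeysOfGet edges v nbrs hg)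
    · exact fun hm => hin (by simpa [PySem.Set.contains, List.contains_iff_mem] using hm)
    · intro k hk; exact (PySem.Set.mem_add result v k).mpr (Or.inl hk)
    · exact (PySem.Set.mem_add result v v).mpr (Or.inr rfl)

def dependencies (edges : List (String × List String)) (packages : List String) : List String :=
  (bfsA edges PySem.Set.empty packages).getD []

-- ===== PORT B =====
-- edges[v] (none = KeyError inside the comprehension)
def lookupRow (edges : List (String × List String)) (v : String) : Option (List String) :=
  (PySem.Dict.mk edges).get? v

-- one fuel unit per round of `while frontier:`.  `result |= frontier` is `result ++ frontier`
-- (exact: the frontier is duplicate-free and disjoint from `result` by construction); the new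
-- frontier is the set of all rows' entries minus the updated result.  The fuel only bounds the
-- number of rounds (each round moves at least one new dict key into `result`, so edges.length + 1
-- rounds never run out); it never changes the value.
def levelsB (edges : List (String × List String)) (fuel : Nat) (result : List String)
    (frontier : PySem.Set String) : Option (List String) :=
  if frontier = [] then some result
  else
    match fuel, frontier.mapM (lookupRow edges) with
    | _, none => none       -- KeyError
    | 0, some _ => none     -- unreachable from dependencies_alt
    | f + 1, some rows =>
      levelsB edges f (result ++ frontier)
        (PySem.Set.diff (PySem.Set.ofList rows.flatten) (result ++ frontier))

def dependencies_alt (edges : List (String × List String)) (packages : List String) : List String :=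
  (levelsB edges (edges.length + 1) [] (PySem.Set.ofList packages)).getD []

-- ===== PRECONDITION & SPEC =====
-- Pre_ requires a well-formed dependency graph: every package and every listed dependency is a key
-- of `edges`.  Outside it A raises KeyError whenever a missing node is reachable; on inputs whose
-- missing nodes are all unreachable A still returns (B returns the same value there) — exact
-- reachability is not expressible as a closed-form condition without re-running the traversal.
def Pre_dependencies (edges : List (String × List String)) (packages : List String) : Prop :=
  (∀ p ∈ packages, p ∈ edges.map Prod.fst) ∧ (∀ pr ∈ edges, ∀ n ∈ pr.2, n ∈ edges.map Prod.fst)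
instance (edges : List (String × List String)) (packages : List String) : Decidable (Pre_dependencies edges packages) := by unfold Pre_dependencies; infer_instance

def pvWitness_dependencies : (List (String × List String)) × List String :=
  ([("a", ["b", "c"]), ("b", ["c"]), ("c", [])], ["a"])

def Spec_dependencies (edges : List (String × List String)) (packages : List String) (out : List String) : Prop := out = dependencies_alt edges packages
instance (edges : List (String × List String)) (packages : List String) (out : List String) : Decidable (Spec_dependencies edges packages out) := by unfold Spec_dependencies; infer_instance

-- ===== CLAIM (what is proved, stated in full; the proofs are below) =====
def Claim_equal_dependencies : Prop := ∀ (edges : List (String × List String)) (packages : List String), Dom_dependencies edges packages → Pre_dependencies edges packages → Spec_dependencies edges packages (dependencies edges packages)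

-- ===== LEMMAS AND PROOFS =====

theorem pvContainsMono (s : List String) (l : List String) (k : String)
    (h : k ∈ s) : k ∈ l.foldl PySem.Set.add s := by
  induction l generalizing s with
  | nil => exact h
  | cons x t ih =>
    exact ih _ ((PySem.Set.mem_add s x k).mpr (Or.inl h))

theorem pvMemUpdate (s : List String) (l : List String) (k : String)
    (h : k ∈ l) : k ∈ l.foldl PySem.Set.add s := by
  induction l generalizing s with
  | nil => cases h
  | cons x t ih =>
    rcases List.mem_cons.mp h with rfl | hkt
    · exact pvContainsMono (PySem.Set.add s k) t k ((PySem.Set.mem_add s k k).mpr (Or.inr rfl))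
    · exact ih _ hkt

-- `getNbrs edges v` = edges[v] with default [] (only used where v is a key)
def getNbrs (edges : List (String × List String)) (v : String) : List String :=
  ((PySem.Dict.mk edges).get? v).getD []

theorem pvSetContainsIff (s : List String) (v : String) : PySem.Set.contains s v = true ↔ v ∈ s :=
  List.contains_iff_mem

theorem pvAddMem (s : List String) (v : String) (h : v ∈ s) : PySem.Set.add s v = s := by
  unfold PySem.Set.add
  rw [if_pos ((pvSetContainsIff s v).mpr h)]

theorem pvAddNot (s : List String) (v : String) (h : v ∉ s) : PySem.Set.add s v = s ++ [v] := by
  unfold PySem.Set.add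
  rw [if_neg (fun hc => h ((pvSetContainsIff s v).mp hc))]

-- update by a duplicate-free list disjoint from the set is plain append
theorem pvUpdateEqAppend (F : List String) : ∀ R : List String, F.Nodup → (∀ v ∈ F, v ∉ R) →
    PySem.Set.update R F = R ++ F := by
  induction F with
  | nil => intro R _ _; simp [PySem.Set.update]
  | cons v F' ih =>
    intro R hnd hdisj
    have h1 : PySem.Set.update R (v :: F') = PySem.Set.update (R ++ [v]) F' := by
      simp only [PySem.Set.update, List.foldl_cons, pvAddNot R v (hdisj v List.mem_cons_self)]
    rw [h1, ih (R ++ [v]) (List.nodup_cons.mp hnd).2]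
    · simp
    · intro w hw hm
      rcases List.mem_append.mp hm with h | h
      · exact hdisj w (List.mem_cons_of_mem _ hw) h
      · have : w = v := by simpa using h
        exact (List.nodup_cons.mp hnd).1 (this ▸ hw)

theorem pvGetOfKey (edges : List (String × List String)) (v : String)
    (h : v ∈ edges.map Prod.fst) : ∃ nbrs, (PySem.Dict.mk edges).get? v = some nbrs := by
  rcases List.mem_map.mp h with ⟨pr, hpr, hfst⟩
  rcases hx : edges.find? (fun p => p.1 == v) with _ | x
  · have := List.find?_eq_none.mp hx pr hpr
    simp [hfst] at this
  · exact ⟨x.2, by simp only [PySem.Dict.get?, Option.map_eq_some_iff]; exact ⟨x, hx, rfl⟩⟩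

-- mapM over the rows of an all-keys frontier succeeds with the rows themselves
theorem pvMapMRows (edges : List (String × List String)) (F : List String)
    (hk : ∀ v ∈ F, v ∈ edges.map Prod.fst) :
    F.mapM (lookupRow edges) = some (F.map (getNbrs edges)) := by
  induction F with
  | nil => rfl
  | cons v F' ih =>
    rcases pvGetOfKey edges v (hk v List.mem_cons_self) with ⟨nbrs, hg⟩
    rw [List.mapM_cons, ih (fun w hw => hk w (List.mem_cons_of_mem _ hw))]
    simp [lookupRow, hg, getNbrs]

-- what bfsA does to a prefix `cur` of its queue: the result set after it, and the neighbours it appended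
def pushAll (edges : List (String × List String)) (R : List String) (cur : List String) : Option (List String × List String) :=
  match cur with
  | [] => some (R, [])
  | v :: cur' =>
    if PySem.Set.contains R v then pushAll edges R cur'
    else
      match (PySem.Dict.mk edges).get? v with
      | none => none
      | some nbrs => (pushAll edges (PySem.Set.add R v) cur').map (fun p => (p.1, nbrs ++ p.2))

-- first occurrences of l not in R, in order
def cleanL (R : List String) (l : List String) : List String :=
  match l with
  | [] => []
  | v :: l' => if PySem.Set.contains R v then cleanL R l' else v :: cleanL (PySem.Set.add R v) l'

theorem bfsA_append (edges : List (String × List String)) (cur : List String) :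
    ∀ (R nxt : List String),
    bfsA edges R (cur ++ nxt) = (pushAll edges R cur).bind (fun p => bfsA edges p.1 (nxt ++ p.2)) := by
  induction cur with
  | nil => intro R nxt; simp [pushAll]
  | cons v cur' ih =>
    intro R nxt
    rw [List.cons_append, bfsA, pushAll]
    by_cases hin : PySem.Set.contains R v = true
    · rw [dif_pos hin, if_pos hin]
      exact ih R nxt
    · rw [dif_neg hin, if_neg hin]
      split
      · rename_i hg
        rw [hg]
        rfl
      · rename_i nbrs hg
        rw [hg]
        rw [show (cur' ++ nxt) ++ nbrs = cur' ++ (nxt ++ nbrs) from List.append_assoc cur' nxt nbrs]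
        rw [ih (PySem.Set.add R v) (nxt ++ nbrs)]
        rcases pushAll edges (PySem.Set.add R v) cur' with _ | p <;> simp [List.append_assoc]

theorem pushAll_clean (edges : List (String × List String)) (l : List String) :
    ∀ R, pushAll edges R l = pushAll edges R (cleanL R l) := by
  induction l with
  | nil => intro R; simp [cleanL]
  | cons v l' ih =>
    intro R
    rw [cleanL]
    by_cases hin : PySem.Set.contains R v = true
    · rw [if_pos hin, pushAll, if_pos hin]
      exact ih R
    · rw [if_neg hin]
      rw [pushAll]
      conv_rhs => rw [pushAll]
      rw [if_neg hin, if_neg hin]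
      rcases hg : (PySem.Dict.mk edges).get? v with _ | nbrs
      · rfl
      · rw [ih (PySem.Set.add R v)]

theorem pushAll_of_clean (edges : List (String × List String)) (F : List String) :
    ∀ R, F.Nodup → (∀ v ∈ F, v ∉ R) → (∀ v ∈ F, v ∈ edges.map Prod.fst) →
    pushAll edges R F = some (PySem.Set.update R F, F.flatMap (getNbrs edges)) := by
  induction F with
  | nil => intro R _ _ _; simp [pushAll, PySem.Set.update]
  | cons v F' ih =>
    intro R hnd hdisj hkeys
    have hvR : v ∉ R := hdisj v List.mem_cons_self
    have hin : ¬ PySem.Set.contains R v := by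
      simpa [PySem.Set.contains, List.contains_iff_mem] using hvR
    rw [pushAll]
    simp only [hin, if_false]
    rcases hg : (PySem.Dict.mk edges).get? v with _ | nbrs
    · exact absurd (hkeys v List.mem_cons_self) (by
        intro hm
        rcases List.mem_map.mp hm with ⟨pr, hpr, hfst⟩
        have : ∃ x, (PySem.Dict.mk edges).get? v = some x := by
          simp only [PySem.Dict.get?, Option.map_eq_some_iff]
          have : edges.find? (fun p => p.1 == v) ≠ none := by
            intro hfn
            have := List.find?_eq_none.mp hfn pr hpr
            simp [hfst] at this
          rcases hx : edges.find? (fun p => p.1 == v) with _ | x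
          · exact absurd hx this
          · exact ⟨x.2, x, hx, rfl⟩
        rcases this with ⟨x, hx⟩
        rw [hg] at hx; cases hx)
    · have hdisj' : ∀ w ∈ F', w ∉ PySem.Set.add R v := by
        intro w hw hmem
        rcases (PySem.Set.mem_add R v w).mp hmem with h1 | rfl
        · exact hdisj w (List.mem_cons_of_mem _ hw) h1
        · exact (List.nodup_cons.mp hnd).1 hw
      rw [ih (PySem.Set.add R v) (List.nodup_cons.mp hnd).2 hdisj'
          (fun w hw => hkeys w (List.mem_cons_of_mem _ hw))]
      simp [PySem.Set.update, getNbrs, hg]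

theorem foldl_add_eq_append_clean (l : List String) :
    ∀ acc : List String, l.foldl PySem.Set.add acc = acc ++ cleanL acc l := by
  induction l with
  | nil => intro acc; simp [cleanL]
  | cons v l' ih =>
    intro acc
    rw [List.foldl_cons, cleanL]
    by_cases hin : PySem.Set.contains acc v = true
    · rw [if_pos hin, pvAddMem acc v ((pvSetContainsIff acc v).mp hin), ih]
    · rw [if_neg hin, pvAddNot acc v (fun hm => hin ((pvSetContainsIff acc v).mpr hm)), ih]
      simp

theorem cleanL_congr (l : List String) :
    ∀ A A' : List String, (∀ v, v ∈ A ↔ v ∈ A') → cleanL A l = cleanL A' l := by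
  induction l with
  | nil => intro A A' _; rfl
  | cons v l' ih =>
    intro A A' hiff
    have hc : PySem.Set.contains A v = PySem.Set.contains A' v := by
      simp only [PySem.Set.contains]
      rcases h1 : A.contains v with _|_ <;> rcases h2 : A'.contains v with _|_ <;> try rfl
      · exact absurd ((hiff v).mpr (List.contains_iff_mem.mp h2)) (by simpa [List.contains_iff_mem] using h1)
      · exact absurd ((hiff v).mp (List.contains_iff_mem.mp h1)) (by simpa [List.contains_iff_mem] using h2)
    rw [cleanL, cleanL, hc]
    by_cases h : PySem.Set.contains A' v = true
    · rw [if_pos h, if_pos h]; exact ih A A' hiff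
    · rw [if_neg h, if_neg h]
      have harg : ∀ w, w ∈ PySem.Set.add A v ↔ w ∈ PySem.Set.add A' v := by
        intro w
        rw [PySem.Set.mem_add, PySem.Set.mem_add, hiff w]
      rw [ih _ _ harg]

theorem cleanL_filter (l : List String) (B : List String) :
    ∀ A : List String, (cleanL A l).filter (fun v => !(PySem.Set.contains B v)) = cleanL (A ++ B) l := by
  induction l with
  | nil => intro A; rfl
  | cons v l' ih =>
    intro A
    rw [cleanL, cleanL]
    by_cases hA : PySem.Set.contains A v = true
    · have hAB : PySem.Set.contains (A ++ B) v = true :=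
        (pvSetContainsIff _ v).mpr (List.mem_append_left _ ((pvSetContainsIff A v).mp hA))
      rw [if_pos hA, if_pos hAB]
      exact ih A
    · by_cases hB : PySem.Set.contains B v = true
      · have hAB : PySem.Set.contains (A ++ B) v = true :=
          (pvSetContainsIff _ v).mpr (List.mem_append_right _ ((pvSetContainsIff B v).mp hB))
        rw [if_neg hA, if_pos hAB, List.filter_cons]
        simp only [hB, Bool.not_true, Bool.false_eq_true, reduceIte]
        rw [ih (PySem.Set.add A v)]
        apply cleanL_congr
        intro w
        rw [List.mem_append, PySem.Set.mem_add, List.mem_append]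
        constructor
        · rintro ((h | rfl) | h)
          exacts [Or.inl h, Or.inr ((pvSetContainsIff B w).mp hB), Or.inr h]
        · rintro (h | h)
          exacts [Or.inl (Or.inl h), Or.inr h]
      · have hAB : ¬ PySem.Set.contains (A ++ B) v = true := by
          intro hm
          rcases List.mem_append.mp ((pvSetContainsIff _ v).mp hm) with h | h
          · exact hA ((pvSetContainsIff A v).mpr h)
          · exact hB ((pvSetContainsIff B v).mpr h)
        rw [if_neg hA, if_neg hAB, List.filter_cons]
        simp only [hB, Bool.not_false, reduceIte, Bool.not_eq_true]
        congr 1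
        rw [ih (PySem.Set.add A v)]
        apply cleanL_congr
        intro w
        rw [List.mem_append, PySem.Set.mem_add, PySem.Set.mem_add, List.mem_append]
        tauto

theorem pvGetPair (edges : List (String × List String)) (v : String) (nbrs : List String)
    (h : (PySem.Dict.mk edges).get? v = some nbrs) : ∃ pr ∈ edges, pr.2 = nbrs := by
  simp only [PySem.Dict.get?, Option.map_eq_some_iff] at h
  obtain ⟨p, hp, rfl⟩ := h
  exact ⟨p, List.mem_of_find?_eq_some hp, rfl⟩

theorem pvFoldlAddLen (l : List String) : ∀ acc : List String,
    (l.foldl PySem.Set.add acc).length ≤ acc.length + l.length := by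
  induction l with
  | nil => intro acc; simp
  | cons v l' ih =>
    intro acc
    rw [List.foldl_cons]
    refine (ih (PySem.Set.add acc v)).trans ?_
    by_cases h : v ∈ acc
    · rw [pvAddMem acc v h]; simp
    · rw [pvAddNot acc v h]; simp; omega

theorem main_equiv (edges : List (String × List String))
    (hcl : ∀ pr ∈ edges, ∀ n ∈ pr.2, n ∈ edges.map Prod.fst) :
    ∀ (n : Nat) (R raw : List String), depKeysLeft edges R ≤ n → raw.Nodup →
    (∀ v ∈ raw, v ∈ edges.map Prod.fst) →
    bfsA edges R (PySem.Set.diff raw R) = levelsB edges n R (PySem.Set.diff raw R) := by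
  intro n
  induction n with
  | zero =>
    intro R raw hle hnd hk
    rcases hF : PySem.Set.diff raw R with _ | ⟨v0, Ftl⟩
    · rw [bfsA, levelsB.eq_def, if_pos rfl]
    · exfalso
      have hv0d : v0 ∈ PySem.Set.diff raw R := by rw [hF]; exact List.mem_cons_self
      have hmf := List.mem_filter.mp hv0d
      have hv0k : v0 ∈ edges.map Prod.fst := hk v0 hmf.1
      have hv0r : v0 ∉ R := by
        intro hm
        have h2 := hmf.2
        simp only [Bool.not_eq_eq_eq_not, Bool.not_true] at h2
        rw [(pvSetContainsIff R v0).mpr hm] at h2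
        cases h2
      have hpos : 0 < depKeysLeft edges R := by
        unfold depKeysLeft
        apply List.length_pos_of_mem
        refine List.mem_filter.mpr ⟨(PySem.List.mem_dedup _ _).mpr hv0k, ?_⟩
        simp only [Bool.not_eq_eq_eq_not, Bool.not_true]
        rcases hc : PySem.Set.contains R v0 with _|_
        · rfl
        · exact absurd ((pvSetContainsIff R v0).mp hc) hv0r
      omega
  | succ n ihn =>
    intro R raw hle hnd hk
    rcases hF : PySem.Set.diff raw R with _ | ⟨v0, Ftl⟩
    · rw [bfsA, levelsB.eq_def, if_pos rfl]
    · have hFeq : PySem.Set.diff raw R = v0 :: Ftl := hF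
      have hFnd : (v0 :: Ftl).Nodup := hFeq ▸ List.Nodup.filter _ hnd
      have hFdisj : ∀ v ∈ v0 :: Ftl, v ∉ R := by
        intro v hv hm
        have hvd : v ∈ PySem.Set.diff raw R := hFeq ▸ hv
        have := (List.mem_filter.mp hvd).2
        simp only [Bool.not_eq_eq_eq_not, Bool.not_true] at this
        exact absurd ((pvSetContainsIff R v).mpr hm) (by rw [this]; exact Bool.false_ne_true)
      have hFk : ∀ v ∈ v0 :: Ftl, v ∈ edges.map Prod.fst := by
        intro v hv
        exact hk v (List.mem_of_mem_filter (hFeq ▸ hv : v ∈ PySem.Set.diff raw R))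
      have hpush := pushAll_of_clean edges (v0 :: Ftl) R hFnd hFdisj hFk
      have hL1 : bfsA edges R (v0 :: Ftl) =
          bfsA edges (PySem.Set.update R (v0 :: Ftl)) ((v0 :: Ftl).flatMap (getNbrs edges)) := by
        have h1 := bfsA_append edges (v0 :: Ftl) R []
        rw [List.append_nil] at h1
        rw [h1, hpush]
        simp
      have hL2 : bfsA edges (PySem.Set.update R (v0 :: Ftl)) ((v0 :: Ftl).flatMap (getNbrs edges)) =
          bfsA edges (PySem.Set.update R (v0 :: Ftl))
            (cleanL (PySem.Set.update R (v0 :: Ftl)) ((v0 :: Ftl).flatMap (getNbrs edges))) := by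
        have h1 := bfsA_append edges ((v0 :: Ftl).flatMap (getNbrs edges)) (PySem.Set.update R (v0 :: Ftl)) []
        have h2 := bfsA_append edges (cleanL (PySem.Set.update R (v0 :: Ftl)) ((v0 :: Ftl).flatMap (getNbrs edges))) (PySem.Set.update R (v0 :: Ftl)) []
        rw [List.append_nil] at h1 h2
        rw [h1, h2, ← pushAll_clean]
      have happ : PySem.Set.update R (v0 :: Ftl) = R ++ (v0 :: Ftl) :=
        pvUpdateEqAppend (v0 :: Ftl) R hFnd hFdisj
      have hrows := pvMapMRows edges (v0 :: Ftl) hFk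
      have hRHS : levelsB edges (n + 1) R (v0 :: Ftl) =
          levelsB edges n (R ++ (v0 :: Ftl))
            (PySem.Set.diff (PySem.Set.ofList (((v0 :: Ftl).map (getNbrs edges)).flatten))
              (R ++ (v0 :: Ftl))) := by
        rw [levelsB.eq_def, if_neg (by simp), hrows]
      have hflat : ((v0 :: Ftl).map (getNbrs edges)).flatten = (v0 :: Ftl).flatMap (getNbrs edges) := by
        simp [List.flatMap_def]
      have hv0k : v0 ∈ edges.map Prod.fst := hFk v0 List.mem_cons_self
      have hv0r : v0 ∉ R := hFdisj v0 List.mem_cons_self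
      have hlt : depKeysLeft edges (PySem.Set.update R (v0 :: Ftl)) < depKeysLeft edges R :=
        pvKeysLeftLt edges R _ v0 hv0k hv0r (fun k hk' => pvContainsMono R _ k hk')
          (pvMemUpdate R _ v0 List.mem_cons_self)
      have hk' : ∀ v ∈ PySem.Set.ofList ((v0 :: Ftl).flatMap (getNbrs edges)),
          v ∈ edges.map Prod.fst := by
        intro v hv
        have hvnew : v ∈ (v0 :: Ftl).flatMap (getNbrs edges) := (PySem.Set.mem_ofList _ _).mp hv
        rcases List.mem_flatMap.mp hvnew with ⟨u, huF, hvu⟩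
        rcases pvGetOfKey edges u (hFk u huF) with ⟨nbrs, hg⟩
        have : getNbrs edges u = nbrs := by simp [getNbrs, hg]
        rw [this] at hvu
        rcases pvGetPair edges u nbrs hg with ⟨pr, hpr, hpr2⟩
        exact hcl pr hpr v (hpr2 ▸ hvu)
      have hIH := ihn (PySem.Set.update R (v0 :: Ftl))
        (PySem.Set.ofList ((v0 :: Ftl).flatMap (getNbrs edges)))
        (by omega) (PySem.Set.nodup_ofList _) hk'
      have hdiff : PySem.Set.diff (PySem.Set.ofList ((v0 :: Ftl).flatMap (getNbrs edges)))
          (PySem.Set.update R (v0 :: Ftl)) =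
          cleanL (PySem.Set.update R (v0 :: Ftl)) ((v0 :: Ftl).flatMap (getNbrs edges)) := by
        have h0 : PySem.Set.ofList ((v0 :: Ftl).flatMap (getNbrs edges)) =
            cleanL [] ((v0 :: Ftl).flatMap (getNbrs edges)) := by
          rw [show PySem.Set.ofList ((v0 :: Ftl).flatMap (getNbrs edges)) =
            List.foldl PySem.Set.add [] ((v0 :: Ftl).flatMap (getNbrs edges)) from rfl]
          rw [foldl_add_eq_append_clean]
          simp
        rw [h0]
        rw [show PySem.Set.diff (cleanL [] ((v0 :: Ftl).flatMap (getNbrs edges))) (PySem.Set.update R (v0 :: Ftl)) =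
          (cleanL [] ((v0 :: Ftl).flatMap (getNbrs edges))).filter
            (fun x => !(PySem.Set.contains (PySem.Set.update R (v0 :: Ftl)) x)) from rfl]
        rw [cleanL_filter]
        simp
      rw [hL1, hL2, hRHS, hflat, ← happ, ← hdiff]
      exact hIH

-- ===== VERDICT (by name: the statement is the Claim_ definition above) =====
theorem dependencies_spec : Claim_equal_dependencies := by
  intro edges packages _hDom hPre
  unfold Spec_dependencies dependencies dependencies_alt
  have h1 := bfsA_append edges packages PySem.Set.empty []
  have h2 := bfsA_append edges (cleanL PySem.Set.empty packages) PySem.Set.empty []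
  rw [List.append_nil] at h1 h2
  have hclean : bfsA edges PySem.Set.empty packages =
      bfsA edges PySem.Set.empty (cleanL PySem.Set.empty packages) := by
    rw [h1, h2, ← pushAll_clean]
  have hofl : PySem.Set.ofList packages = cleanL PySem.Set.empty packages := by
    rw [show PySem.Set.ofList packages = List.foldl PySem.Set.add [] packages from rfl]
    rw [foldl_add_eq_append_clean]
    rfl
  have hdiff0 : PySem.Set.diff (PySem.Set.ofList packages) PySem.Set.empty = PySem.Set.ofList packages := by
    rw [show PySem.Set.diff (PySem.Set.ofList packages) PySem.Set.empty =
      (PySem.Set.ofList packages).filter (fun x => !(PySem.Set.contains PySem.Set.empty x)) from rfl]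
    simp [PySem.Set.contains, PySem.Set.empty]
  have hfuel : depKeysLeft edges PySem.Set.empty ≤ edges.length + 1 := by
    unfold depKeysLeft
    refine (List.length_filter_le _ _).trans ?_
    rw [PySem.List.dedup_eq_ofList,
      show PySem.Set.ofList (edges.map Prod.fst) = (edges.map Prod.fst).foldl PySem.Set.add [] from rfl]
    have h := pvFoldlAddLen (edges.map Prod.fst) []
    simp only [List.length_nil, Nat.zero_add, List.length_map] at h
    omega
  have hmain := main_equiv edges hPre.2 (edges.length + 1) PySem.Set.empty
    (PySem.Set.ofList packages) hfuel (PySem.Set.nodup_ofList packages)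
    (fun v hv => hPre.1 v ((PySem.Set.mem_ofList packages v).mp hv))
  rw [hdiff0] at hmain
  rw [hclean, ← hofl, hmain]
  rfl
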